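-- pv_equiv track=rewrite | github.com/LichiY/test-runner | rerun_tool/results.py | _compute_verdict_from_parts
-- ===== SOURCE A (Python) =====
-- from typing import Dict, List, Tuple  # 导入类型注解工具。
--
-- def _compute_verdict_from_parts(status: str, results: List[str]) -> str:  # 基于状态和结果数组计算综合 verdict。
--     if status != "completed":  # 非完成状态优先按构建或准备错误处理。
--         if status == "build_failed":  # 构建失败需要单独区分。
--             return "BUILD_ERROR"  # 返回构建错误 verdict。
--         return "SETUP_ERROR"  # 其余非完成状态统一视为准备阶段错误。
--     if not results:  # 完成状态但没有结果数组时说明执行信息缺失。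
--         return "SETUP_ERROR"  # 返回准备阶段错误 verdict。
--     if all(result == "error" for result in results):  # 如果全部都是执行 error 则视为运行错误。
--         return "RUN_ERROR"  # 返回运行错误 verdict。
--     test_results = [result for result in results if result != "error"]  # 过滤掉 error 后再判断 flaky 与稳定性。
--     if not test_results:  # 过滤后为空说明没有有效测试结果。
--         return "RUN_ERROR"  # 返回运行错误 verdict。
--     if all(result == "pass" for result in test_results):  # 有效结果全部通过时说明阶段内稳定通过。
--         return "STABLE_PASS"  # 返回稳定通过 verdict。
--     if all(result == "fail" for result in test_results):  # 有效结果全部失败时说明阶段内稳定失败。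
--         return "STABLE_FAIL"  # 返回稳定失败 verdict。
--     return "FLAKY"  # 既有 pass 又有 fail 时说明当前阶段仍然 flaky。
-- ===== SOURCE B (Python) =====
-- def _compute_verdict_from_parts(status, results):
--     if status != "completed":
--         return "BUILD_ERROR" if status == "build_failed" else "SETUP_ERROR"
--     if not results:
--         return "SETUP_ERROR"
--     n_pass = n_fail = n_error = 0
--     for r in results:
--         if r == "pass":
--             n_pass += 1
--         elif r == "fail":
--             n_fail += 1
--         elif r == "error":
--             n_error += 1
--     non_error = len(results) - n_error
--     if non_error == 0:
--         return "RUN_ERROR"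
--     if n_pass == non_error:
--         return "STABLE_PASS"
--     if n_fail == non_error:
--         return "STABLE_FAIL"
--     return "FLAKY"
-- ===== Notes on version B (the rewrite author's own statement) =====
-- stated objective: simpler
-- what changed: Replaces A's filter comprehension plus three separate all()-scans with a single counting pass (n_pass/n_fail/n_error) followed by count comparisons against non_error, which also collapses A's two RUN_ERROR branches into one.
import Mathlib
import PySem

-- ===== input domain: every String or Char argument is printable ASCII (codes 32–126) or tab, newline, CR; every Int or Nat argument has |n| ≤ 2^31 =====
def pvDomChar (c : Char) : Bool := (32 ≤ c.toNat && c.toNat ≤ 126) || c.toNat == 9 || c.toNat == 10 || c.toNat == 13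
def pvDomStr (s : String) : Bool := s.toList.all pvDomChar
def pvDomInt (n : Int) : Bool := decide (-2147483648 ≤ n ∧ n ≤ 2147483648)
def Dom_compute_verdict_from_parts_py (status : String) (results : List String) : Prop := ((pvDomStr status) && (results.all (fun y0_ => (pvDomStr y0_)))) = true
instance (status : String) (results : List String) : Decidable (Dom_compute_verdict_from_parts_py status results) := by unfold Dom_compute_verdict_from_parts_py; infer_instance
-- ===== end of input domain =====

-- B replaces A's filter comprehension plus three all()-scans by one counting pass and
-- count comparisons (simpler; collapses A's two RUN_ERROR branches).

-- ===== PORT A =====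
def compute_verdict_from_parts_py (status : String) (results : List String) : String :=
  if status ≠ "completed" then
    if status == "build_failed" then "BUILD_ERROR" else "SETUP_ERROR"
  else if results = [] then "SETUP_ERROR"
  else if results.all (fun result => result == "error") then "RUN_ERROR"
  else
    let test_results := results.filter (fun result => result != "error")
    if test_results = [] then "RUN_ERROR"
    else if test_results.all (fun result => result == "pass") then "STABLE_PASS"
    else if test_results.all (fun result => result == "fail") then "STABLE_FAIL"
    else "FLAKY"

-- ===== PORT B =====
-- one step of B's counting loop: (n_pass, n_fail, n_error)
def pvTally (acc : Int × Int × Int) (r : String) : Int × Int × Int :=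
  if r == "pass" then (acc.1 + 1, acc.2.1, acc.2.2)
  else if r == "fail" then (acc.1, acc.2.1 + 1, acc.2.2)
  else if r == "error" then (acc.1, acc.2.1, acc.2.2 + 1)
  else acc

def compute_verdict_from_parts_py_alt (status : String) (results : List String) : String :=
  if status ≠ "completed" then
    if status == "build_failed" then "BUILD_ERROR" else "SETUP_ERROR"
  else if results = [] then "SETUP_ERROR"
  else
    let c := results.foldl pvTally ((0 : Int), (0 : Int), (0 : Int))
    let non_error : Int := (results.length : Int) - c.2.2
    if non_error = 0 then "RUN_ERROR"
    else if c.1 = non_error then "STABLE_PASS"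
    else if c.2.1 = non_error then "STABLE_FAIL"
    else "FLAKY"

-- ===== PRECONDITION & SPEC =====
def Spec_compute_verdict_from_parts_py (status : String) (results : List String) (out : String) : Prop := out = compute_verdict_from_parts_py_alt status results
instance (status : String) (results : List String) (out : String) : Decidable (Spec_compute_verdict_from_parts_py status results out) := by unfold Spec_compute_verdict_from_parts_py; infer_instance

-- ===== CLAIM (what is proved, stated in full; the proofs are below) =====
def Claim_equal_compute_verdict_from_parts_py : Prop := ∀ (status : String) (results : List String), Dom_compute_verdict_from_parts_py status results → Spec_compute_verdict_from_parts_py status results (compute_verdict_from_parts_py status results)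

-- ===== LEMMAS AND PROOFS =====

lemma pvTally_foldl (l : List String) (a b c : Int) :
    l.foldl pvTally (a, b, c) =
      (a + l.count "pass", b + l.count "fail", c + l.count "error") := by
  induction l generalizing a b c with
  | nil => simp
  | cons x xs ih =>
    by_cases hp : x = "pass"
    · simp [pvTally, hp, ih]; ring
    · by_cases hf : x = "fail"
      · simp [pvTally, hp, hf, ih]; ring
      · by_cases he : x = "error"
        · simp [pvTally, hp, hf, he, ih]; ring
        · simp [pvTally, hp, hf, he, ih]

lemma pv_all_eq_count (l : List String) (s : String) :
    l.all (fun r => r == s) = true ↔ l.count s = l.length := by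
  rw [List.count_eq_length, List.all_eq_true]
  constructor
  · intro h b hb
    exact (beq_iff_eq.mp (h b hb)).symm
  · intro h b hb
    exact beq_iff_eq.mpr (h b hb).symm

lemma pv_filter_len (l : List String) :
    (l.filter (fun r => r != "error")).length + l.count "error" = l.length := by
  induction l with
  | nil => simp
  | cons x xs ih =>
    by_cases he : x = "error" <;> simp [he, List.count_cons, List.filter_cons] <;> omega

lemma pv_count_filter (l : List String) (s : String) (hs : s ≠ "error") :
    (l.filter (fun r => r != "error")).count s = l.count s := by
  induction l with
  | nil => rfl
  | cons x xs ih =>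
    by_cases he : x = "error"
    · simp [he, List.filter_cons, List.count_cons, hs, ih]
      intro h; exact absurd h.symm hs
    · simp [he, List.filter_cons, List.count_cons, ih]

theorem pv_main (status : String) (results : List String) :
    compute_verdict_from_parts_py status results =
      compute_verdict_from_parts_py_alt status results := by
  unfold compute_verdict_from_parts_py compute_verdict_from_parts_py_alt
  by_cases hs : status = "completed"
  · simp only [hs, ne_eq, not_true_eq_false, if_false]
    by_cases hr : results = []
    · simp [hr]
    · simp only [hr, if_false]
      have hfold := pvTally_foldl results 0 0 0
      simp only [hfold, zero_add]
      have hflen := pv_filter_len results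
      have hcp := pv_count_filter results "pass" (by decide)
      have hcf := pv_count_filter results "fail" (by decide)
      have hce_le : results.count "error" ≤ results.length := List.count_le_length
      -- the two RUN_ERROR conditions of A and the single one of B
      have hall : results.all (fun r => r == "error") = true ↔
          results.count "error" = results.length := pv_all_eq_count results "error"
      have hfe : results.filter (fun r => r != "error") = [] ↔
          results.count "error" = results.length := by
        rw [List.eq_nil_iff_length_eq_zero]; omega
      have hap := pv_all_eq_count (results.filter (fun r => r != "error")) "pass"
      have haf := pv_all_eq_count (results.filter (fun r => r != "error")) "fail"
      by_cases hce : results.count "error" = results.length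
      · simp [hall.mpr hce, hce]
      · have hB0 : ¬ ((results.length : Int) - (results.count "error" : Int) = 0) := by
          push_cast; omega
        simp only [hall, hce, if_false, hfe, hB0]
        by_cases hpass : (results.filter (fun r => r != "error")).count "pass"
            = (results.filter (fun r => r != "error")).length
        · have : (results.count "pass" : Int) =
              (results.length : Int) - (results.count "error" : Int) := by
            push_cast; omega
          simp [hap.mpr hpass, this]
        · have hne : ¬ ((results.count "pass" : Int) =
              (results.length : Int) - (results.count "error" : Int)) := by
            push_cast; omega
          have hapf : ¬ ((results.filter (fun r => r != "error")).all
              (fun r => r == "pass") = true) := by rw [hap]; exact hpass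
          simp only [hapf, if_false, hne]
          by_cases hfail : (results.filter (fun r => r != "error")).count "fail"
              = (results.filter (fun r => r != "error")).length
          · have : (results.count "fail" : Int) =
                (results.length : Int) - (results.count "error" : Int) := by
              push_cast; omega
            simp [haf.mpr hfail, this]
          · have hnf : ¬ ((results.count "fail" : Int) =
                (results.length : Int) - (results.count "error" : Int)) := by
              push_cast; omega
            have haff : ¬ ((results.filter (fun r => r != "error")).all
                (fun r => r == "fail") = true) := by rw [haf]; exact hfail
            simp [haff, hnf]
  · simp [hs]

-- ===== VERDICT (by name: the statement is the Claim_ definition above) =====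
theorem compute_verdict_from_parts_py_spec : Claim_equal_compute_verdict_from_parts_py := by
  intro status results _
  exact pv_main status results
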